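-- pv_equiv track=rewrite | github.com/Tjeri/Advent-of-Code | 2023/day11.py | get_y_offsets
-- ===== SOURCE A (Python) =====
-- def get_y_offsets(lines: list[str]) -> dict[int, int]:
--     y_offsets = {}
--     offset = 0
--     for y, line in enumerate(lines):
--         if '#' not in line:
--             offset += 1
--         else:
--             y_offsets[y] = offset
--     return y_offsets
-- ===== SOURCE B (Python) =====
-- def _bisect_left(a, x):
--     lo, hi = 0, len(a)
--     while lo < hi:
--         mid = (lo + hi) // 2
--         if a[mid] < x:
--             lo = mid + 1
--         else:
--             hi = mid
--     return lo
--
--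
-- def get_y_offsets(lines: list[str]) -> dict[int, int]:
--     empty = [y for y, line in enumerate(lines) if '#' not in line]
--     return {y: _bisect_left(empty, y) for y, line in enumerate(lines) if '#' in line}
-- ===== Notes on version B (the rewrite author's own statement) =====
-- stated objective: alternative
-- what changed: B replaces A's single accumulating scan (threading a running offset through a dict-building loop) by an index-first-then-query strategy: it first collects the list of empty-row indices, then builds the dict by binary-searching (bisect_left) that list for each galaxy row.
import Mathlib
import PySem

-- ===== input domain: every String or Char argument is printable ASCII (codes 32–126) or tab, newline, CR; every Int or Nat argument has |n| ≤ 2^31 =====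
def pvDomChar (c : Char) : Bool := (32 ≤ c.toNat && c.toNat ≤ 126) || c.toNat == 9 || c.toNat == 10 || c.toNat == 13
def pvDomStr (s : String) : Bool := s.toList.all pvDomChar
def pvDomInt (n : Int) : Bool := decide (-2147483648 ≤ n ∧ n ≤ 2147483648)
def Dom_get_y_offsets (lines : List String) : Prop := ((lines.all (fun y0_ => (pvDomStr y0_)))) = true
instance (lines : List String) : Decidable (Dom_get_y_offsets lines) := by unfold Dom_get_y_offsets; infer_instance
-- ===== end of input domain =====

-- B builds the empty-row index list first and recovers each galaxy row's offset by binary search,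
-- instead of A's single scan threading a running offset; same results, alternative decomposition.

-- ===== PORT A =====
def get_y_offsets (lines : List String) : List (Int × Int) :=
  ((PySem.List.enumerate lines 0).foldl
    (fun (st : PySem.Dict Int Int × Int) (p : Int × String) =>
      if !(PySem.Str.isIn "#" p.2) then (st.1, st.2 + 1)
      else (st.1.insert p.1 st.2, st.2))
    (PySem.Dict.empty, 0)).1.items

-- ===== PORT B =====
-- Source B's hand-written _bisect_left is CPython's bisect_left loop = PySem.List.bisectLeft (exact).
def get_y_offsets_alt (lines : List String) : List (Int × Int) :=
  let empty : List Int :=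
    ((PySem.List.enumerate lines 0).filter (fun p => !(PySem.Str.isIn "#" p.2))).map (·.1)
  ((PySem.List.enumerate lines 0).filter (fun p => PySem.Str.isIn "#" p.2)).map
    (fun p => (p.1, (PySem.List.bisectLeft empty p.1 : Int)))

-- ===== PRECONDITION & SPEC =====
def Spec_get_y_offsets (lines : List String) (out : List (Int × Int)) : Prop := out = get_y_offsets_alt lines
instance (lines : List String) (out : List (Int × Int)) : Decidable (Spec_get_y_offsets lines out) := by unfold Spec_get_y_offsets; infer_instance

-- ===== CLAIM (what is proved, stated in full; the proofs are below) =====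
def Claim_equal_get_y_offsets : Prop := ∀ (lines : List String), Dom_get_y_offsets lines → Spec_get_y_offsets lines (get_y_offsets lines)

-- ===== LEMMAS AND PROOFS =====

-- reference recursion: galaxies with their offsets, starting at index s with accumulated offset off
def yOffRef (ls : List String) (s off : Int) : List (Int × Int) :=
  match ls with
  | [] => []
  | l :: ls => if PySem.Str.isIn "#" l then (s, off) :: yOffRef ls (s + 1) off
               else yOffRef ls (s + 1) (off + 1)

theorem fst_mem_enumerate_ge {α : Type} (xs : List α) (s : Int) (p : Int × α)
    (hp : p ∈ PySem.List.enumerate xs s) : s ≤ p.1 := by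
  rcases (PySem.List.mem_enumerate_iff xs s p).1 hp with ⟨k, hk, rfl⟩
  simp

theorem yOffRef_A : ∀ (ls : List String) (s : Int) (d : PySem.Dict Int Int) (off : Int),
    (∀ k ∈ d.keys, k < s) →
    ((PySem.List.enumerate ls s).foldl
      (fun (st : PySem.Dict Int Int × Int) (p : Int × String) =>
        if !(PySem.Str.isIn "#" p.2) then (st.1, st.2 + 1)
        else (st.1.insert p.1 st.2, st.2)) (d, off)).1.items
      = d.items ++ yOffRef ls s off := by
  intro ls
  induction ls with
  | nil => intro s d off _; simp [PySem.List.enumerate_nil, yOffRef]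
  | cons l ls ih =>
    intro s d off hk
    rw [PySem.List.enumerate_cons, List.foldl_cons]
    by_cases h : PySem.Str.isIn "#" l = true
    · rw [if_neg (by rw [h]; decide)]
      have hnc : d.contains s = false := by
        rw [PySem.Dict.contains_eq_decide_mem_keys]
        simp only [decide_eq_false_iff_not]
        intro hs; exact absurd (hk s hs) (lt_irrefl s)
      rw [ih (s + 1) (d.insert s off) off
            (by intro k hk'
                rcases (PySem.Dict.mem_keys_insert d s k off).1 hk' with rfl | hmem
                · omega
                · exact lt_trans (hk k hmem) (by omega))]
      rw [PySem.Dict.items_insert_of_not_contains _ _ hnc]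
      rw [show yOffRef (l :: ls) s off = (s, off) :: yOffRef ls (s + 1) off from by
            rw [yOffRef, if_pos h]]
      simp
    · rw [if_pos (by simp only [Bool.not_eq_true] at h; rw [h]; decide)]
      rw [ih (s + 1) d (off + 1) (fun k hm => lt_trans (hk k hm) (by omega))]
      rw [show yOffRef (l :: ls) s off = yOffRef ls (s + 1) (off + 1) from by
            rw [yOffRef, if_neg h]]

-- bisect_left on a sorted list counts the elements below the probe
theorem bisectLeft_eq_countP (xs : List Int) (x : Int)
    (hs : List.Pairwise (· ≤ ·) xs) :
    PySem.List.bisectLeft xs x = xs.countP (fun e => decide (e < x)) := by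
  obtain ⟨hle, hlt, hge⟩ := PySem.List.bisectLeft_spec xs x hs
  set r := PySem.List.bisectLeft xs x with hr
  have hsplit : xs = xs.take r ++ xs.drop r := (List.take_append_drop r xs).symm
  rw [hsplit, List.countP_append]
  have h1 : (xs.take r).countP (fun e => decide (e < x)) = (xs.take r).length := by
    apply List.countP_eq_length.2
    intro a ha
    rw [List.mem_iff_getElem] at ha
    rcases ha with ⟨j, hj, rfl⟩
    have hjr : j < r := lt_of_lt_of_le hj (by simp)
    have hjl : j < xs.length := by
      have := List.length_take_le r xs; omega
    rw [List.getElem_take]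
    simpa using hlt j hjl hjr
  have h2 : (xs.drop r).countP (fun e => decide (e < x)) = 0 := by
    apply List.countP_eq_zero.2
    intro a ha
    rw [List.mem_iff_getElem] at ha
    rcases ha with ⟨j, hj, rfl⟩
    have hjl : r + j < xs.length := by
      rw [List.length_drop] at hj; omega
    rw [List.getElem_drop]
    have := hge (r + j) hjl (by omega)
    simp; omega
  rw [h1, h2, List.length_take]
  omega

theorem yOffRef_B : ∀ (ls : List String) (s off : Int),
    yOffRef ls s off
      = ((PySem.List.enumerate ls s).filter (fun p => PySem.Str.isIn "#" p.2)).map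
          (fun p => (p.1,
            off + (((PySem.List.enumerate ls s).filter
                      (fun q => !(PySem.Str.isIn "#" q.2))).countP (fun q => decide (q.1 < p.1)) : Int))) := by
  intro ls
  induction ls with
  | nil => intro s off; simp [PySem.List.enumerate_nil, yOffRef]
  | cons l ls ih =>
    intro s off
    rw [PySem.List.enumerate_cons]
    by_cases h : PySem.Str.isIn "#" l = true
    · rw [show yOffRef (l :: ls) s off = (s, off) :: yOffRef ls (s + 1) off from by
            rw [yOffRef, if_pos h]]
      simp only [List.filter_cons, h, Bool.not_true, Bool.false_eq_true, if_false, if_true]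
      rw [List.map_cons]
      congr 1
      · have hz : ((PySem.List.enumerate ls (s + 1)).filter
            (fun q => !(PySem.Str.isIn "#" q.2))).countP (fun q => decide (q.1 < s)) = 0 := by
          apply List.countP_eq_zero.2
          intro q hq
          have := fst_mem_enumerate_ge ls (s + 1) q (List.mem_of_mem_filter hq)
          simp only [decide_eq_true_eq]; omega
        rw [hz]
        norm_num
      · rw [ih (s + 1) off]
    · rw [show yOffRef (l :: ls) s off = yOffRef ls (s + 1) (off + 1) from by
            rw [yOffRef, if_neg h]]
      simp only [List.filter_cons, h, Bool.not_false, Bool.false_eq_true, if_false, if_true]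
      rw [ih (s + 1) (off + 1)]
      apply List.map_congr_left
      intro p hp
      have hps : s + 1 ≤ p.1 := fst_mem_enumerate_ge ls (s + 1) p (List.mem_of_mem_filter hp)
      rw [List.countP_cons]
      have hlt : decide ((s : Int) < p.1) = true := by simp only [decide_eq_true_eq]; omega
      simp only [hlt, if_true]
      push_cast
      ring

theorem empty_sorted (ls : List String) (s : Int) :
    List.Pairwise (· ≤ ·)
      (((PySem.List.enumerate ls s).filter (fun p => !(PySem.Str.isIn "#" p.2))).map (·.1)) := by
  apply List.Pairwise.map
  · intro a b (h : a.1 < b.1); exact le_of_lt h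
  · exact (PySem.List.pairwise_lt_enumerate ls s).filter _

-- ===== VERDICT (by name: the statement is the Claim_ definition above) =====
theorem get_y_offsets_spec : Claim_equal_get_y_offsets := by
  intro lines _
  show get_y_offsets lines = get_y_offsets_alt lines
  simp only [get_y_offsets, get_y_offsets_alt]
  rw [yOffRef_A lines 0 PySem.Dict.empty 0 (by simp [PySem.Dict.keys_empty])]
  rw [yOffRef_B]
  simp only [PySem.Dict.empty, List.nil_append]
  apply List.map_congr_left
  intro p hp
  rw [bisectLeft_eq_countP _ _ (empty_sorted lines 0)]
  rw [List.countP_map]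
  refine Prod.ext rfl ?_
  simp only [zero_add, Nat.cast_inj]
  apply List.countP_congr
  intro q _
  simp [Function.comp]
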